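-- pv_equiv track=rewrite | github.com/xyaocao/CQS-SMART | Schema-Linking/RSL-SQL-Bird/src/enhance_ppl_with_column_meaning.py | format_column_meaning_text
-- ===== SOURCE A (Python) =====
-- from typing import Dict, Any, List
--
-- def format_column_meaning_text(column_meaning: Dict[str, str]) -> str:
--     """
--     Format column meanings into readable text for schema.
--     Groups by table for better organization.
--     """
--     if not column_meaning:
--         return ""
--
--     lines = ["### The meaning of every column:"]
--     lines.append("#")
--
--     # Group by table
--     tables = {}
--     for col_key, description in column_meaning.items():
--         parts = col_key.split('.')
--         if len(parts) == 2:
--             table, col = parts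
--         else:
--             table, col = 'unknown', col_key
--
--         if table not in tables:
--             tables[table] = []
--
--         # Clean up description - remove leading # if present
--         desc = description.strip()
--         if desc.startswith('#'):
--             desc = desc[1:].strip()
--
--         # Truncate very long descriptions
--         if len(desc) > 200:
--             desc = desc[:200] + "..."
--
--         tables[table].append(f"# {col}: {desc}")
--
--     for table, cols in sorted(tables.items()):
--         lines.append(f"# [{table}]")
--         lines.extend(cols)
--
--     lines.append("#")
--     return '\n'.join(lines)
-- ===== SOURCE B (Python) =====
-- def _clean(description):
--     """Normalise one description: strip, drop one leading '#', truncate at 200."""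
--     d = description.strip()
--     if d[:1] == '#':
--         d = d[1:].strip()
--     return d if len(d) <= 200 else d[:200] + "..."
--
-- def _record(col_key, description):
--     """One (table, formatted line) record for a column."""
--     parts = col_key.split('.')
--     if len(parts) == 2:
--         return parts[0], "# " + parts[1] + ": " + _clean(description)
--     return 'unknown', "# " + col_key + ": " + _clean(description)
--
-- def format_column_meaning_text(column_meaning):
--     """Same output as A via a flat record list: each column becomes a
--     (table, line) record in one comprehension; the body is then emitted per
--     sorted-unique table name with a per-table filter, instead of A's
--     incrementally grown dict of lists."""
--     records = [_record(k, v) for k, v in column_meaning.items()]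
--     if not records:
--         return ""
--     body = []
--     for table in sorted(dict.fromkeys(t for t, _ in records)):
--         body.append("# [" + table + "]")
--         body.extend(line for t, line in records if t == table)
--     return '\n'.join(["### The meaning of every column:", "#"] + body + ["#"])
-- ===== Notes on version B (the rewrite author's own statement) =====
-- stated objective: alternative
-- what changed: Replaces A's incrementally-grown dict of per-table line lists plus a sort of its items with a single comprehension producing flat (table, line) records via small helper functions, then one pass over the sorted deduplicated table names emitting each header followed by a per-table filter of the records.
import Mathlib
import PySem

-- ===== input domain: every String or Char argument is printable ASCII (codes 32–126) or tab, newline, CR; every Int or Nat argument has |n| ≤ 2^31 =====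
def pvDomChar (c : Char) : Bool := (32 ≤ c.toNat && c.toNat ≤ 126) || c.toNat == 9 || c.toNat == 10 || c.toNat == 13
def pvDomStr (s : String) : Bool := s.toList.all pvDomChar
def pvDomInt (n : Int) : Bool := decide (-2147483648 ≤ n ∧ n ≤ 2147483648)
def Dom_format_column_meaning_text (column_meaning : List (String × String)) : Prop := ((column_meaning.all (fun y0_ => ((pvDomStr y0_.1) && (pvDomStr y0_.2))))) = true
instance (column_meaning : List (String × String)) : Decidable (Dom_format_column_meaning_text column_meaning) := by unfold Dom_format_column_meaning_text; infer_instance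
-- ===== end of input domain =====

-- B replaces A's incrementally-grown dict of per-table line lists (and the sort of its
-- items) by a flat comprehension of (table, line) records built by string-level helpers,
-- then one pass over the sorted deduplicated table names with a per-table filter
-- (objective: alternative decomposition, same output).

-- ===== PORT A =====
-- one dict entry: (table, "# col: desc") with A's split/strip/#-removal/truncation logic
def pvEntryA (p : String × String) : String × List Char :=
  let tc : List Char × List Char :=
    match PySem.Chars.splitOn p.1.toList ['.'] with
    | [table, col] => (table, col)                       -- len(parts) == 2
    | _            => ("unknown".toList, p.1.toList)
  let desc := PySem.Chars.strip p.2.toList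
  let desc := if PySem.Chars.startswith desc ['#']
              then PySem.Chars.strip (PySem.List.slice desc (some 1) none)   -- desc[1:].strip()
              else desc
  let desc := if 200 < desc.length
              then PySem.List.slice desc none (some 200) ++ "...".toList     -- desc[:200] + "..."
              else desc
  (String.ofList tc.1, '#' :: ' ' :: tc.2 ++ ':' :: ' ' :: desc)

def format_column_meaning_text (column_meaning : List (String × String)) : String :=
  if column_meaning = [] then "" else
  let lines : List (List Char) := ["### The meaning of every column:".toList, ['#']]
  let tables : PySem.Dict String (List (List Char)) :=
    column_meaning.foldl (fun tables p =>
      (if tables.contains (pvEntryA p).1 then tables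
       else tables.insert (pvEntryA p).1 []).modify (pvEntryA p).1 [] (· ++ [(pvEntryA p).2]))
      PySem.Dict.empty
  -- a dict's keys are unique, so sorted(tables.items()) orders by the key alone (ties never compared): exact here
  let lines := (PySem.List.sorted tables.items (fun q => q.1)).foldl
      (fun lines q => (lines ++ ['#' :: ' ' :: '[' :: q.1.toList ++ [']']]) ++ q.2) lines
  PySem.Str.join "\n" ((lines ++ [['#']]).map String.ofList)

-- ===== PORT B =====
-- _clean: strip, drop one leading '#' (tested as d[:1] == '#'), truncate at 200
def pvClean (description : String) : String :=
  let d := PySem.Str.strip description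
  let d := if PySem.Str.slice d none (some 1) = "#"
           then PySem.Str.strip (PySem.Str.slice d (some 1) none)
           else d
  if PySem.Str.len d ≤ 200 then d else PySem.Str.slice d none (some 200) ++ "..."

-- _record: one (table, formatted line) pair for a column
def pvRecord (col_key description : String) : String × String :=
  match PySem.Str.split? col_key "." with       -- '.' is non-empty, so split? never fails
  | some [t, c] => (t, "# " ++ c ++ ": " ++ pvClean description)
  | _           => ("unknown", "# " ++ col_key ++ ": " ++ pvClean description)

def format_column_meaning_text_alt (column_meaning : List (String × String)) : String :=
  let records := column_meaning.map (fun p => pvRecord p.1 p.2)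
  if records = [] then "" else
  let body : List String :=
    (PySem.List.sorted (PySem.List.dedup (records.map (·.1))) (fun t => t)).flatMap
      (fun table => ("# [" ++ table ++ "]") ::
        (records.filter (fun r => r.1 == table)).map (·.2))
  PySem.Str.join "\n" (["### The meaning of every column:", "#"] ++ body ++ ["#"])

-- ===== PRECONDITION & SPEC =====
def Spec_format_column_meaning_text (column_meaning : List (String × String)) (out : String) : Prop := out = format_column_meaning_text_alt column_meaning
instance (column_meaning : List (String × String)) (out : String) : Decidable (Spec_format_column_meaning_text column_meaning out) := by unfold Spec_format_column_meaning_text; infer_instance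

-- ===== CLAIM (what is proved, stated in full; the proofs are below) =====
def Claim_equal_format_column_meaning_text : Prop := ∀ (column_meaning : List (String × String)), Dom_format_column_meaning_text column_meaning → Spec_format_column_meaning_text column_meaning (format_column_meaning_text column_meaning)

-- ===== LEMMAS AND PROOFS =====

-- d[:1] == '#' is exactly startswith('#')
theorem pv_take_one_eq_iff (l : List Char) :
    (PySem.List.slice l none (some 1) = ['#']) ↔ PySem.Chars.startswith l ['#'] = true := by
  rw [PySem.List.slice_to l (by norm_num)]
  cases l with
  | nil => simp [PySem.Chars.startswith]
  | cons c t =>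
    show List.take (Int.toNat 1) (c :: t) = ['#'] ↔ _
    rw [show Int.toNat 1 = 1 from rfl, List.take_succ_cons, List.take_zero]
    simp only [PySem.Chars.startswith, List.isPrefixOf, Bool.and_true, beq_iff_eq,
      List.cons.injEq, and_true]
    exact eq_comm

-- B's string-level description pipeline computes A's char-level one
theorem pvClean_toList (s : String) :
    (pvClean s).toList =
      (let desc := PySem.Chars.strip s.toList
       let desc := if PySem.Chars.startswith desc ['#']
                   then PySem.Chars.strip (PySem.List.slice desc (some 1) none)
                   else desc
       if 200 < desc.length then PySem.List.slice desc none (some 200) ++ "...".toList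
       else desc) := by
  have h1 : (PySem.Str.slice (PySem.Str.strip s) none (some 1) = "#")
      ↔ PySem.Chars.startswith (PySem.Chars.strip s.toList) ['#'] = true := by
    rw [← pv_take_one_eq_iff, ← String.toList_inj, PySem.Str.toList_slice, PySem.Str.toList_strip]
    simp [PySem.Chars.slice_eq_listSlice]
  unfold pvClean
  dsimp only
  by_cases hc : PySem.Chars.startswith (PySem.Chars.strip s.toList) ['#'] = true
  · rw [if_pos (h1.mpr hc), if_pos hc]
    have hdl : (PySem.Str.strip (PySem.Str.slice (PySem.Str.strip s) (some 1) none)).toList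
        = PySem.Chars.strip (PySem.List.slice (PySem.Chars.strip s.toList) (some 1) none) := by
      rw [PySem.Str.toList_strip, PySem.Str.toList_slice, PySem.Str.toList_strip]
      simp [PySem.Chars.slice_eq_listSlice]
    rw [PySem.Str.len_eq, hdl]
    by_cases hl : 200 < (PySem.Chars.strip (PySem.List.slice (PySem.Chars.strip s.toList) (some 1) none)).length
    · rw [if_neg (by omega), if_pos hl, String.toList_append, PySem.Str.toList_slice, hdl]
      simp [PySem.Chars.slice_eq_listSlice]
    · rw [if_pos (by omega), if_neg hl]; exact hdl
  · rw [if_neg (fun h => hc (h1.mp h)), if_neg hc]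
    rw [PySem.Str.len_eq, PySem.Str.toList_strip]
    by_cases hl : 200 < (PySem.Chars.strip s.toList).length
    · rw [if_neg (by omega), if_pos hl, String.toList_append, PySem.Str.toList_slice,
        PySem.Str.toList_strip]
      simp [PySem.Chars.slice_eq_listSlice]
    · rw [if_pos (by omega), if_neg hl]; exact PySem.Str.toList_strip s

-- B's record helper computes exactly A's dict entry
theorem pvRecord_eq (p : String × String) :
    pvRecord p.1 p.2 = ((pvEntryA p).1, String.ofList (pvEntryA p).2) := by
  unfold pvRecord pvEntryA
  have hsplit : Option.map (List.map String.toList) (PySem.Str.split? p.1 ".")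
      = some (PySem.Chars.splitOn p.1.toList ['.']) := by
    rw [PySem.Str.split?_map]
    simp [PySem.Chars.split?]
  obtain ⟨l, hl, hmap⟩ : ∃ l, PySem.Str.split? p.1 "." = some l
      ∧ l.map String.toList = PySem.Chars.splitOn p.1.toList ['.'] := by
    cases h : PySem.Str.split? p.1 "." with
    | none => rw [h] at hsplit; simp at hsplit
    | some l => exact ⟨l, rfl, by rw [h] at hsplit; simpa using hsplit⟩
  rw [hl, ← hmap]
  have hofl : ∀ t : String, String.ofList t.toList = t := fun t =>
    String.toList_inj.mp (String.toList_ofList)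
  have hline : ∀ c : String,
      "# " ++ c ++ ": " ++ pvClean p.2
        = String.ofList ('#' :: ' ' :: c.toList ++ ':' :: ' ' ::
            (let desc := PySem.Chars.strip p.2.toList
             let desc := if PySem.Chars.startswith desc ['#']
                         then PySem.Chars.strip (PySem.List.slice desc (some 1) none)
                         else desc
             if 200 < desc.length then PySem.List.slice desc none (some 200) ++ "...".toList
             else desc)) := by
    intro c
    rw [← String.toList_inj, String.toList_ofList, String.toList_append, String.toList_append,
      String.toList_append, pvClean_toList]
    show (['#', ' '] ++ c.toList) ++ [':', ' '] ++ _ = _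
    simp [List.append_assoc]
  match l with
  | [t, c] =>
    dsimp only [List.map_cons, List.map_nil]
    exact Prod.ext (hofl t).symm (by rw [hline c])
  | [] =>
    dsimp only [List.map_nil]
    exact Prod.ext (hofl "unknown").symm (by rw [hline p.1])
  | [t] =>
    dsimp only [List.map_cons, List.map_nil]
    exact Prod.ext (hofl "unknown").symm (by rw [hline p.1])
  | t :: c :: e :: r =>
    dsimp only [List.map_cons]
    exact Prod.ext (hofl "unknown").symm (by rw [hline p.1])

-- A's "if table not in tables: tables[table] = []; tables[table].append(line)" is one modify with default []
theorem pv_step_eq (d : PySem.Dict String (List (List Char))) (t : String) (l : List Char) :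
    (if d.contains t then d else d.insert t []).modify t [] (· ++ [l]) = d.modify t [] (· ++ [l]) := by
  by_cases h : d.contains t = true
  · simp [h]
  · simp only [Bool.not_eq_true] at h
    simp [h, PySem.Dict.modify, PySem.Dict.getD_insert_self, PySem.Dict.insert_insert_self,
      PySem.Dict.getD_of_not_contains d _ h]

theorem format_column_meaning_text_spec : Claim_equal_format_column_meaning_text := by
  intro cm _
  unfold Spec_format_column_meaning_text format_column_meaning_text format_column_meaning_text_alt
  by_cases hcm : cm = []
  · simp [hcm]
  · have hrecne : cm.map (fun p => pvRecord p.1 p.2) ≠ [] := by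
      simpa [List.map_eq_nil_iff] using hcm
    simp only [if_neg hcm, if_neg hrecne]
    -- rewrite B's records through pvRecord_eq
    have hB : cm.map (fun p => pvRecord p.1 p.2)
        = (cm.map pvEntryA).map (fun r => (r.1, String.ofList r.2)) := by
      rw [List.map_map]; exact List.map_congr_left (fun p _ => pvRecord_eq p)
    rw [hB]
    -- A side: collapse the dict construction (as in the char-level proof)
    simp only [pv_step_eq]
    rw [show List.foldl (fun (tables : PySem.Dict String (List (List Char))) p =>
          tables.modify (pvEntryA p).1 [] (· ++ [(pvEntryA p).2])) PySem.Dict.empty cm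
        = List.foldl (fun (d : PySem.Dict String (List (List Char))) (r : String × List Char) =>
            d.modify r.1 [] (· ++ [r.2])) PySem.Dict.empty (cm.map pvEntryA)
        from (List.foldl_map (f := pvEntryA)
            (g := fun (d : PySem.Dict String (List (List Char))) (r : String × List Char) =>
              d.modify r.1 [] (· ++ [r.2])) (l := cm) (init := PySem.Dict.empty)).symm]
    set recs := cm.map pvEntryA with hrecs
    set d := recs.foldl (fun d (r : String × List Char) => d.modify r.1 [] (· ++ [r.2])) PySem.Dict.empty with hd
    have hkeys : d.keys = PySem.Set.ofList (recs.map (·.1)) := by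
      have h := PySem.Dict.keys_foldl_modify_key recs (fun r => r.1) [] (fun _ r v => v ++ [r.2]) PySem.Dict.empty
      simpa [PySem.Dict.keys_empty] using h
    have hnd : d.keys.Nodup := by rw [hkeys]; exact PySem.Set.nodup_ofList _
    have hG : ∀ t, d.getD t [] = (recs.filter (fun r => r.1 == t)).map (·.2) := fun t => by
      simpa [PySem.Dict.getD_empty] using PySem.Dict.getD_foldl_modify_append recs PySem.Dict.empty t
    have hsorted : PySem.List.sorted d.items (fun q => q.1)
        = (PySem.List.sorted (PySem.Set.ofList (recs.map (·.1))) (fun t => t)).map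
            (fun k => (k, d.getD k [])) := by
      apply PySem.List.sorted_eq_of_perm_of_pairwise_lt
      · rw [PySem.Dict.items_eq_map_keys d hnd [], hkeys]
        exact (PySem.List.sorted_perm _ _ _).map _
      · exact (PySem.List.sorted_ofList_pairwise_lt (recs.map (·.1))).map _ (fun a b h => h)
    rw [hsorted]
    simp only [List.append_assoc]
    rw [show (fun (lines : List (List Char)) (q : String × List (List Char)) =>
          lines ++ (['#' :: ' ' :: '[' :: q.1.toList ++ [']']] ++ q.2))
        = (fun lines q => lines ++ (fun q : String × List (List Char) =>
            ['#' :: ' ' :: '[' :: q.1.toList ++ [']']] ++ q.2) q) from rfl,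
      PySem.List.foldl_append_eq_flatMap, List.flatMap_map]
    simp only [hG]
    -- B side: reduce the string-level record list to recs
    have hfst : (recs.map (fun r => (r.1, String.ofList r.2))).map (·.1) = recs.map (·.1) := by
      simp [List.map_map]
    rw [hfst, PySem.List.dedup_eq_ofList]
    congr 1
    have hofl : ∀ t : String, String.ofList t.toList = t := fun t =>
      String.toList_inj.mp String.toList_ofList
    have hh : String.ofList ['#'] = "#" := by decide
    have hhdr : ∀ a : String, String.ofList ('#' :: ' ' :: '[' :: a.toList ++ [']'])
        = "# [" ++ a ++ "]" := by
      intro a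
      rw [← String.toList_inj, String.toList_ofList, String.toList_append, String.toList_append]
      show ('#' :: ' ' :: '[' :: a.toList ++ [']']) = (['#', ' ', '['] ++ a.toList) ++ [']']
      simp
    simp only [List.map_append, List.map_flatMap, List.map_cons, List.map_nil, List.map_map,
      List.singleton_append, List.filter_map, hh, hofl, List.append_assoc]
    congr 1
    congr 1
    refine congrArg₂ List.flatMap (funext fun a => ?_) rfl
    rw [hhdr a]
    refine congrArg (List.cons _) ?_
    rw [show ((fun (r : String × String) => r.1 == a) ∘ fun (r : String × List Char) =>
          (r.1, String.ofList r.2)) = fun (r : String × List Char) => r.1 == a from rfl]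
    exact List.map_congr_left fun r _ => rfl
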